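-- pv_equiv track=rewrite | github.com/HogRider31400/TER_HittingSet | Python/BMR.py | build_Epartition
-- ===== SOURCE A (Python) =====
-- def build_Epartition(hypergraph, vi, Vpartition, V):
--     new_edges = []
--     for edge in hypergraph:
--         if vi not in edge:
--             new_edge = edge - V
--             if not new_edge:
--                 continue
--             if not any(new_edge >= e for e in new_edges):
--                 new_edges = [e for e in new_edges if not e >= new_edge]
--                 new_edges.append(new_edge)
--     return new_edges
-- ===== SOURCE B (Python) =====
-- def _dedup(diffs):
--     # keep-first dedup with a worklist: emit the head, drop later sets equal to it
--     out = []
--     rem = diffs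
--     while rem:
--         c, rem = rem[0], rem[1:]
--         if c:
--             out.append(c)
--             rem = [d for d in rem if d != c]
--     return out
--
--
-- def build_Epartition(hypergraph, vi, Vpartition, V):
--     # candidate pipeline: edges avoiding vi, mapped to edge - V
--     diffs = [edge - V for edge in hypergraph if vi not in edge]
--     cands = _dedup(diffs)
--     # keep exactly the candidates with no proper subset among the candidates
--     return [c for c in cands if not any(d < c for d in cands)]
-- ===== Notes on version B (the rewrite author's own statement) =====
-- stated objective: alternative
-- what changed: Replaced the incremental antichain maintenance (prune supersets and append on every accepted edge) by a staged pipeline: a comprehension collecting all candidates edge-V for edges avoiding vi, a worklist-based keep-first deduplication that drops later equal sets, then one global filter keeping the candidates with no proper subset among them.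
import Mathlib
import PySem

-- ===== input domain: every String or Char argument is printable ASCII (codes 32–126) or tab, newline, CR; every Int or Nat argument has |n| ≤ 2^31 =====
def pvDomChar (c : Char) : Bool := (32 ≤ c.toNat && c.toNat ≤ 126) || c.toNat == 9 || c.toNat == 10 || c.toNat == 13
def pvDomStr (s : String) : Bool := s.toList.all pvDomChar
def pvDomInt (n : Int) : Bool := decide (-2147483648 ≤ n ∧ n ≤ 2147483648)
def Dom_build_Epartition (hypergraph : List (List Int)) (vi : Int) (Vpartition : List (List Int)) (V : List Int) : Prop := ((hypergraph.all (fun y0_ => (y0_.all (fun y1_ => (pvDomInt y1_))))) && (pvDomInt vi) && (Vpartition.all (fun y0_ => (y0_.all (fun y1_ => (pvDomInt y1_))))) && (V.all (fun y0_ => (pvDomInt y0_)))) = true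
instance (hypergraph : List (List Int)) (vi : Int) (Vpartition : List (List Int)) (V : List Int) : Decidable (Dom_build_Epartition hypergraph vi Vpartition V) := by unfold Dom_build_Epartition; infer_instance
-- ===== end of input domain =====

-- B replaces A's incremental prune-and-append antichain maintenance by a staged pipeline:
-- comprehension of candidates, worklist keep-first dedup, then one global minimal filter
-- (alternative decomposition, same asymptotic cost).


-- ===== PORT A =====
-- loop body of A: test vi ∉ edge, compute edge - V, skip empty, skip if it is a superset
-- of a kept set, otherwise prune kept supersets and append
def bepStepA (vi : Int) (V : List Int) (new_edges : List (List Int)) (edge : List Int) : List (List Int) :=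
  if PySem.Set.contains edge vi then new_edges
  else
    let new_edge := PySem.Set.diff edge V
    if new_edge = [] then new_edges
    else if new_edges.any (fun e => PySem.Set.issuperset new_edge e) then new_edges
    else (new_edges.filter (fun e => ! PySem.Set.issuperset e new_edge)) ++ [new_edge]

def build_Epartition (hypergraph : List (List Int)) (vi : Int) (_Vpartition : List (List Int)) (V : List Int) : List (List Int) :=
  hypergraph.foldl (bepStepA vi V) []

-- ===== PORT B =====
-- B's _dedup: keep-first dedup with a worklist — emit the head, drop later sets equal to it
def bepDedupLoop (out : List (List Int)) : List (List Int) → List (List Int)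
  | [] => out
  | c :: rem =>
      if c = [] then bepDedupLoop out rem
      else bepDedupLoop (out ++ [c]) (rem.filter (fun d => ! PySem.Set.equal d c))
  termination_by l => l.length
  decreasing_by
    · simp
    · exact Nat.lt_succ_of_le (le_trans (le_of_eq List.length_unattach)
        (le_trans (List.length_filter_le _ _) (le_of_eq List.length_attach)))

def build_Epartition_alt (hypergraph : List (List Int)) (vi : Int) (_Vpartition : List (List Int)) (V : List Int) : List (List Int) :=
  -- candidate pipeline: edges avoiding vi, mapped to edge - V
  let diffs := (hypergraph.filter (fun edge => ! PySem.Set.contains edge vi)).map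
      (fun edge => PySem.Set.diff edge V)
  let cands := bepDedupLoop [] diffs
  -- keep exactly the candidates with no proper subset among the candidates (d < c on Python sets)
  cands.filter (fun c => ! cands.any (fun d => PySem.Set.issubset d c && ! PySem.Set.issubset c d))

-- ===== PRECONDITION & SPEC =====
def Spec_build_Epartition (hypergraph : List (List Int)) (vi : Int) (Vpartition : List (List Int)) (V : List Int) (out : List (List Int)) : Prop := out = build_Epartition_alt hypergraph vi Vpartition V
instance (hypergraph : List (List Int)) (vi : Int) (Vpartition : List (List Int)) (V : List Int) (out : List (List Int)) : Decidable (Spec_build_Epartition hypergraph vi Vpartition V out) := by unfold Spec_build_Epartition; infer_instance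

-- ===== CLAIM (what is proved, stated in full; the proofs are below) =====
def Claim_equal_build_Epartition : Prop := ∀ (hypergraph : List (List Int)) (vi : Int) (Vpartition : List (List Int)) (V : List Int), Dom_build_Epartition hypergraph vi Vpartition V → Spec_build_Epartition hypergraph vi Vpartition V (build_Epartition hypergraph vi Vpartition V)

-- ===== LEMMAS AND PROOFS =====

-- proof-side reformulation of B's collection phase as a fold (dedup step on one candidate)
def bepStepD (acc : List (List Int)) (c : List Int) : List (List Int) :=
  if c = [] then acc
  else if acc.any (fun d => PySem.Set.equal d c) then acc
  else acc ++ [c]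

def bepStepB (vi : Int) (V : List Int) (acc : List (List Int)) (edge : List Int) : List (List Int) :=
  if PySem.Set.contains edge vi then acc else bepStepD acc (PySem.Set.diff edge V)

-- set-inclusion as a Prop on the list representation
def bepSb (a b : List Int) : Prop := ∀ x ∈ a, x ∈ b

-- c is minimal among L (no proper subset of c in L)
def bepMinl (L : List (List Int)) (c : List Int) : Prop := ∀ d ∈ L, ¬ (bepSb d c ∧ ¬ bepSb c d)

-- the global minimal filter of B's last phase
def bepMinFil (L : List (List Int)) : List (List Int) :=
  L.filter (fun c => ! L.any (fun d => PySem.Set.issubset d c && ! PySem.Set.issubset c d))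

lemma bepSb_iff (a b : List Int) : PySem.Set.issubset a b = true ↔ bepSb a b :=
  PySem.Set.issubset_iff a b

lemma bepSb_refl (a : List Int) : bepSb a a := fun _ h => h

lemma bepSb_trans {a b c : List Int} (h1 : bepSb a b) (h2 : bepSb b c) : bepSb a c :=
  fun x hx => h2 x (h1 x hx)

lemma bepEq_symm (a b : List Int) : PySem.Set.equal a b = PySem.Set.equal b a := by
  rw [Bool.eq_iff_iff, PySem.Set.equal_iff, PySem.Set.equal_iff]
  exact ⟨fun h x => (h x).symm, fun h x => (h x).symm⟩

lemma bepStrict_iff (d c : List Int) :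
    (PySem.Set.issubset d c && ! PySem.Set.issubset c d) = true ↔ (bepSb d c ∧ ¬ bepSb c d) := by
  rw [Bool.and_eq_true, Bool.not_eq_true', Bool.eq_false_iff, ne_eq, bepSb_iff, bepSb_iff]

lemma bepMinb_iff (L : List (List Int)) (c : List Int) :
    (! L.any (fun d => PySem.Set.issubset d c && ! PySem.Set.issubset c d)) = true ↔ bepMinl L c := by
  rw [Bool.not_eq_true', List.any_eq_false]
  exact forall_congr' (fun d => forall_congr' (fun _ => not_congr (bepStrict_iff d c)))

lemma bepMem_minFil {L : List (List Int)} {c : List Int} :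
    c ∈ bepMinFil L ↔ c ∈ L ∧ bepMinl L c := by
  unfold bepMinFil
  rw [List.mem_filter, bepMinb_iff]

-- descent: every member of L contains a minimal member of L
lemma bepDescent (L : List (List Int)) :
    ∀ n (d : List Int), d.toFinset.card ≤ n → d ∈ L → ∃ m ∈ L, bepSb m d ∧ bepMinl L m := by
  intro n
  induction n with
  | zero =>
      intro d hc hd
      refine ⟨d, hd, bepSb_refl d, fun e _he hcon => ?_⟩
      have hdempty : d.toFinset = ∅ := Finset.card_eq_zero.mp (Nat.le_zero.mp hc)
      refine hcon.2 (fun x hx => ?_)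
      exact absurd (List.mem_toFinset.mpr hx) (by simp [hdempty])
  | succ n ih =>
      intro d hc hd
      by_cases hmin : bepMinl L d
      · exact ⟨d, hd, bepSb_refl d, hmin⟩
      · simp only [bepMinl, not_forall] at hmin
        obtain ⟨e, he, hprop⟩ := hmin
        rw [not_not] at hprop
        obtain ⟨hed, hde⟩ := hprop
        have hsub : e.toFinset ⊂ d.toFinset := by
          constructor
          · intro x hx
            exact List.mem_toFinset.mpr (hed x (List.mem_toFinset.mp hx))
          · intro h
            exact hde (fun x hx => List.mem_toFinset.mp (h (List.mem_toFinset.mpr hx)))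
        have hcard : e.toFinset.card ≤ n := by
          have := Finset.card_lt_card hsub
          omega
        obtain ⟨m, hm, hmd, hmmin⟩ := ih e hcard he
        exact ⟨m, hm, bepSb_trans hmd hed, hmmin⟩

lemma bepDescent' {L : List (List Int)} {d : List Int} (hd : d ∈ L) :
    ∃ m ∈ L, bepSb m d ∧ bepMinl L m :=
  bepDescent L d.toFinset.card d le_rfl hd

-- a member of L extending a minimal element of L keeps every other member minimal or not as before
lemma bepMinl_append_of_mem {L : List (List Int)} {c x : List Int}
    (hkeep : bepMinl L x → ¬ (bepSb c x ∧ ¬ bepSb x c)) :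
    bepMinl (L ++ [c]) x ↔ bepMinl L x := by
  constructor
  · exact fun h d hd => h d (List.mem_append.mpr (Or.inl hd))
  · intro h d hd
    rcases List.mem_append.mp hd with hd | hd
    · exact h d hd
    · rw [List.mem_singleton.mp hd]
      exact hkeep h

-- appending a candidate that strictly contains a kept minimal element changes nothing
lemma bepMinFil_append_skip {L : List (List Int)} {c e : List Int}
    (heL : e ∈ L) (hec : bepSb e c) (hnce : ¬ bepSb c e) :
    bepMinFil (L ++ [c]) = bepMinFil L := by
  unfold bepMinFil
  rw [List.filter_append]
  have hcdrop : (! (L ++ [c]).any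
      (fun d => PySem.Set.issubset d c && ! PySem.Set.issubset c d)) = false := by
    rw [← Bool.not_eq_true, bepMinb_iff]
    exact fun h => h e (List.mem_append.mpr (Or.inl heL)) ⟨hec, hnce⟩
  rw [List.filter_congr (l := L)
      (q := fun x => ! L.any (fun d => PySem.Set.issubset d x && ! PySem.Set.issubset x d)) ?_]
  · simp only [List.filter_singleton, hcdrop, cond_false, List.append_nil]
  · intro x hxL
    show (! (L ++ [c]).any (fun d => PySem.Set.issubset d x && ! PySem.Set.issubset x d))
        = (! L.any (fun d => PySem.Set.issubset d x && ! PySem.Set.issubset x d))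
    rw [Bool.eq_iff_iff, bepMinb_iff, bepMinb_iff]
    refine bepMinl_append_of_mem (fun hmx ⟨hcx, _hnxc⟩ => ?_)
    -- e ⊆ c ⊆ x and e ⊊ x contradicts minimality of x in L
    have hex : bepSb e x := bepSb_trans hec hcx
    have hnxe : ¬ bepSb x e := fun hxe => hnce (bepSb_trans hcx hxe)
    exact hmx e heL ⟨hex, hnxe⟩

-- appending a candidate no member of L is included in: prune its supersets, append it
lemma bepMinFil_append_new {L : List (List Int)} {c : List Int}
    (hnosub : ∀ d ∈ L, ¬ bepSb d c) :
    bepMinFil (L ++ [c]) =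
      (bepMinFil L).filter (fun e => ! PySem.Set.issuperset e c) ++ [c] := by
  unfold bepMinFil
  rw [List.filter_append, List.filter_filter]
  have hckeep : (! (L ++ [c]).any
      (fun d => PySem.Set.issubset d c && ! PySem.Set.issubset c d)) = true := by
    rw [bepMinb_iff]
    intro d hd hcon
    rcases List.mem_append.mp hd with hd | hd
    · exact hnosub d hd hcon.1
    · exact hcon.2 (List.mem_singleton.mp hd ▸ bepSb_refl c)
  rw [List.filter_congr (l := L)
      (q := fun x => (! PySem.Set.issuperset x c)
        && ! L.any (fun d => PySem.Set.issubset d x && ! PySem.Set.issubset x d)) ?_]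
  · simp only [List.filter_singleton, hckeep, cond_true]
  · intro x hxL
    show (! (L ++ [c]).any (fun d => PySem.Set.issubset d x && ! PySem.Set.issubset x d))
        = ((! PySem.Set.issuperset x c)
            && ! L.any (fun d => PySem.Set.issubset d x && ! PySem.Set.issubset x d))
    have hxc : PySem.Set.issuperset x c = PySem.Set.issubset c x := rfl
    by_cases hcx : bepSb c x
    · -- c ⊊ x, so x is no longer minimal and A prunes it too
      have hnxc : ¬ bepSb x c := hnosub x hxL
      have h1 : ¬ bepMinl (L ++ [c]) x := fun h =>
        h c (List.mem_append.mpr (Or.inr (List.mem_singleton.mpr rfl))) ⟨hcx, hnxc⟩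
      have e1 : (! (L ++ [c]).any
          (fun d => PySem.Set.issubset d x && ! PySem.Set.issubset x d)) = false := by
        rw [← Bool.not_eq_true, bepMinb_iff]; exact h1
      rw [e1, hxc, (bepSb_iff c x).mpr hcx]
      simp
    · have e2 : PySem.Set.issuperset x c = false := by
        rw [hxc, ← Bool.not_eq_true, bepSb_iff]; exact hcx
      rw [e2, Bool.not_false, Bool.true_and, Bool.eq_iff_iff, bepMinb_iff, bepMinb_iff]
      exact bepMinl_append_of_mem (fun _ hcon => hcx hcon.1)

-- the key step lemma: A's loop body on the minimal filter = the minimal filter of the dedup-fold body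
lemma bepStep (vi : Int) (V : List Int) (L : List (List Int)) (edge : List Int) :
    bepStepA vi V (bepMinFil L) edge = bepMinFil (bepStepB vi V L edge) := by
  unfold bepStepA bepStepB bepStepD
  by_cases hvi : PySem.Set.contains edge vi = true
  · rw [if_pos hvi, if_pos hvi]
  · rw [if_neg hvi, if_neg hvi]
    by_cases hemp : PySem.Set.diff edge V = []
    · rw [if_pos hemp, if_pos hemp]
    · rw [if_neg hemp, if_neg hemp]
      by_cases hBeq : (L.any fun d => PySem.Set.equal d (PySem.Set.diff edge V)) = true
      · -- a set-equal candidate was already collected: both sides are unchanged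
        rw [if_pos hBeq]
        rw [List.any_eq_true] at hBeq
        obtain ⟨d, hdL, hdc⟩ := hBeq
        have heq := (PySem.Set.equal_iff d (PySem.Set.diff edge V)).mp hdc
        obtain ⟨m, hmL, hmd, hmmin⟩ := bepDescent' hdL
        have hA : ((bepMinFil L).any
            fun e => PySem.Set.issuperset (PySem.Set.diff edge V) e) = true := by
          rw [List.any_eq_true]
          refine ⟨m, bepMem_minFil.mpr ⟨hmL, hmmin⟩, ?_⟩
          exact (bepSb_iff m _).mpr (fun x hx => (heq x).mp (hmd x hx))
        rw [if_pos hA]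
      · rw [if_neg hBeq]
        have hBeq' : ∀ d ∈ L, ¬ (bepSb d (PySem.Set.diff edge V) ∧ bepSb (PySem.Set.diff edge V) d) := by
          intro d hdL hdc
          rw [List.any_eq_true] at hBeq
          exact hBeq ⟨d, hdL, (PySem.Set.equal_iff d _).mpr
            (fun x => ⟨fun hx => hdc.1 x hx, fun hx => hdc.2 x hx⟩)⟩
        by_cases hAany : ((bepMinFil L).any
            fun e => PySem.Set.issuperset (PySem.Set.diff edge V) e) = true
        · -- a kept set is contained in the new candidate: A skips, B's append is filtered away
          rw [if_pos hAany]
          rw [List.any_eq_true] at hAany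
          obtain ⟨e, heF, hec⟩ := hAany
          have hec' : bepSb e (PySem.Set.diff edge V) := (bepSb_iff e _).mp hec
          obtain ⟨heL, hemin⟩ := bepMem_minFil.mp heF
          exact (bepMinFil_append_skip heL hec'
            (fun h => hBeq' e heL ⟨hec', h⟩)).symm
        · -- genuinely new minimal candidate
          rw [if_neg hAany]
          have hnosub : ∀ d ∈ L, ¬ bepSb d (PySem.Set.diff edge V) := by
            intro d hdL hdc
            obtain ⟨m, hmL, hmd, hmmin⟩ := bepDescent' hdL
            refine hAany ?_
            rw [List.any_eq_true]
            exact ⟨m, bepMem_minFil.mpr ⟨hmL, hmmin⟩,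
              (bepSb_iff m _).mpr (bepSb_trans hmd hdc)⟩
          exact (bepMinFil_append_new hnosub).symm

lemma bepFold (vi : Int) (V : List Int) :
    ∀ (hyp : List (List Int)) (L : List (List Int)),
      hyp.foldl (bepStepA vi V) (bepMinFil L) = bepMinFil (hyp.foldl (bepStepB vi V) L) := by
  intro hyp
  induction hyp with
  | nil => intro L; rfl
  | cons e t ih =>
      intro L
      simp only [List.foldl_cons]
      rw [bepStep vi V L e, ih]

-- the dedup-fold over edges is the dedup-fold over the candidate pipeline
lemma bepFoldB_pipeline (vi : Int) (V : List Int) :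
    ∀ (hyp : List (List Int)) (acc : List (List Int)),
      hyp.foldl (bepStepB vi V) acc =
        ((hyp.filter (fun edge => ! PySem.Set.contains edge vi)).map
          (fun edge => PySem.Set.diff edge V)).foldl bepStepD acc := by
  intro hyp
  induction hyp with
  | nil => intro acc; rfl
  | cons e t ih =>
      intro acc
      simp only [List.foldl_cons, List.filter_cons]
      by_cases hvi : PySem.Set.contains e vi = true
      · have hm : vi ∈ e := by simpa [PySem.Set.contains] using hvi
        rw [bepStepB, if_pos hvi]
        simp [hm, ih]
      · have hm : vi ∉ e := by simpa [PySem.Set.contains] using hvi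
        rw [bepStepB, if_neg hvi]
        simp [hm, ih]

-- proof-side recursive form of B's dedup loop (no accumulator)
def bepDedup : List (List Int) → List (List Int)
  | [] => []
  | c :: rest =>
      if c = [] then bepDedup rest
      else c :: bepDedup (rest.filter (fun d => ! PySem.Set.equal d c))
  termination_by l => l.length
  decreasing_by
    · simp
    · exact Nat.lt_succ_of_le (le_trans (le_of_eq List.length_unattach)
        (le_trans (List.length_filter_le _ _) (le_of_eq List.length_attach)))

-- B's recursive dedup absorbs an empty head
lemma bepDedup_nil_cons (l : List (List Int)) : bepDedup ([] :: l) = bepDedup l := by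
  rw [bepDedup]
  simp

-- B's recursive dedup on a nonempty head
lemma bepDedup_cons {c : List Int} (hc : c ≠ []) (l : List (List Int)) :
    bepDedup (c :: l) = c :: bepDedup (l.filter (fun d => ! PySem.Set.equal d c)) := by
  rw [bepDedup]
  simp [hc]

-- the worklist loop equals the recursive dedup with the emitted prefix in front
lemma bepDedupLoop_eq : ∀ (n : Nat) (l out : List (List Int)), l.length ≤ n →
    bepDedupLoop out l = out ++ bepDedup l := by
  intro n
  induction n with
  | zero =>
      intro l out hl
      rw [List.length_eq_zero_iff.mp (Nat.le_zero.mp hl)]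
      simp [bepDedupLoop, bepDedup]
  | succ n ih =>
      intro l out hl
      match l with
      | [] => simp [bepDedupLoop, bepDedup]
      | c :: rem =>
          simp only [List.length_cons, Nat.add_le_add_iff_right] at hl
          by_cases hemp : c = []
          · subst hemp
            rw [bepDedupLoop, if_pos rfl, bepDedup_nil_cons, ih rem out hl]
          · rw [bepDedupLoop, if_neg hemp, bepDedup_cons hemp,
              ih _ (out ++ [c]) (le_trans (List.length_filter_le _ _) hl)]
            simp

-- the dedup-fold equals B's recursive keep-first dedup (modulo the already-collected accumulator)
lemma bepFoldD_dedup :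
    ∀ (ds acc : List (List Int)),
      ds.foldl bepStepD acc =
        acc ++ bepDedup (ds.filter (fun c => ! acc.any (fun d => PySem.Set.equal d c))) := by
  intro ds
  induction ds with
  | nil => intro acc; simp [bepDedup]
  | cons c t ih =>
      intro acc
      rw [List.foldl_cons, List.filter_cons]
      by_cases hemp : c = []
      · subst hemp
        rw [show bepStepD acc [] = acc from by rw [bepStepD]; exact if_pos rfl]
        by_cases hany : (acc.any fun d => PySem.Set.equal d []) = true
        · rw [if_neg (by simp [hany]), ih]
        · rw [if_pos (by simp at hany ⊢; exact hany), ih,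
            bepDedup_nil_cons]
      · by_cases hany : (acc.any fun d => PySem.Set.equal d c) = true
        · rw [show bepStepD acc c = acc from by rw [bepStepD, if_neg hemp]; exact if_pos hany,
            if_neg (by simp [hany]), ih]
        · rw [show bepStepD acc c = acc ++ [c] from by
              rw [bepStepD, if_neg hemp]; exact if_neg hany,
            if_pos (by simp at hany ⊢; exact hany),
            ih (acc ++ [c])]
          have hf : (t.filter (fun x => ! (acc ++ [c]).any (fun d => PySem.Set.equal d x)))
              = ((t.filter (fun x => ! acc.any (fun d => PySem.Set.equal d x))).filter
                  (fun d => ! PySem.Set.equal d c)) := by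
            rw [List.filter_filter]
            apply List.filter_congr
            intro x _
            simp only [List.any_append, List.any_cons, List.any_nil, Bool.or_false,
              Bool.not_or]
            rw [bepEq_symm c x]
            exact (Bool.and_comm _ _).symm
          rw [hf, bepDedup_cons hemp]
          simp

-- ===== VERDICT (by name: the statement is the Claim_ definition above) =====
theorem build_Epartition_spec : Claim_equal_build_Epartition := by
  intro hypergraph vi Vpartition V _
  unfold Spec_build_Epartition build_Epartition build_Epartition_alt
  have h := bepFold vi V hypergraph []
  have hnil : bepMinFil [] = [] := rfl
  rw [hnil] at h
  have hd : ∀ l : List (List Int), bepDedupLoop [] l = bepDedup l := fun l => by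
    rw [bepDedupLoop_eq l.length l [] le_rfl, List.nil_append]
  rw [h, bepFoldB_pipeline vi V hypergraph [], bepFoldD_dedup]
  simp only [List.any_nil, Bool.not_false, List.filter_true, List.nil_append]
  rw [← hd]
  rfl
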